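-- pv_equiv track=rewrite | github.com/Intevation/intelmq-fody-api | tickets_api/tickets_api/serve.py | query_prepare_export
-- ===== SOURCE A (Python) =====
-- def query_prepare_export(q):
--     """ Prepares a Query-string in order to Export Everything from the DB
--
--     Args:
--         q: An array of Tuples created with query_build_query
--
--     Returns: A Tuple consisting of a query sting and an array of parameters.
--
--     """
--     q_string = "SELECT * FROM events" \
--                " JOIN directives on directives.events_id = events.id " \
--                " JOIN sent on sent.id = directives.sent_id "
--     params = []
--     # now iterate over q (which had to be created with query_build_query
--     # previously) and should be a list of tuples an concatenate the resulting query.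
--     # and a list of query parameters
--     counter = 0
--     for subquerytuple in q:
--         if counter > 0:
--             q_string = q_string + " AND " + subquerytuple[0]
--             params.append(subquerytuple[1])
--         else:
--             q_string = q_string + " WHERE " + subquerytuple[0]
--             params.append(subquerytuple[1])
--         counter += 1
--     return q_string, params
-- ===== SOURCE B (Python) =====
-- def query_prepare_export(q):
--     """Same query/params as A: collect clauses and params in separate passes,
--     then append one WHERE ... AND ... block only if there are clauses."""
--     q_string = ("SELECT * FROM events"
--                 " JOIN directives on directives.events_id = events.id "
--                 " JOIN sent on sent.id = directives.sent_id ")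
--     clauses = [t[0] for t in q]
--     params = [t[1] for t in q]
--     if clauses:
--         q_string += " WHERE " + " AND ".join(clauses)
--     return q_string, params
-- ===== Notes on version B (the rewrite author's own statement) =====
-- stated objective: simpler
-- what changed: Replaces the counter-driven accumulation loop (per-iteration WHERE-vs-AND branch, string rebuilt each step) by two map passes plus a single guarded ' AND '.join, so the loop state (growing string, counter) disappears.
import Mathlib
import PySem

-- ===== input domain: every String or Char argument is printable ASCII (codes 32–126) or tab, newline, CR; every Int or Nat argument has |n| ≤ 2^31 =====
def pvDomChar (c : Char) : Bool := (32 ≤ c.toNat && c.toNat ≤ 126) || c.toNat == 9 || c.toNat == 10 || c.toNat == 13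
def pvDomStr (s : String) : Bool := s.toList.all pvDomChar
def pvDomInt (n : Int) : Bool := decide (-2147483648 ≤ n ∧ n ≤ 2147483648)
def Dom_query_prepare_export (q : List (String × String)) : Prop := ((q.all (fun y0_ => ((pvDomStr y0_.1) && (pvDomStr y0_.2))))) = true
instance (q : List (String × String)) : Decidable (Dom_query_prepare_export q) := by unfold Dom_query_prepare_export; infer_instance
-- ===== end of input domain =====

-- B replaces A's counter-driven loop by two map passes and a single guarded ' AND '.join (simpler; same cost).

-- ===== PORT A =====
def query_prepare_export (q : List (String × String)) : String × List String :=
  let q_string := "SELECT * FROM events" ++ " JOIN directives on directives.events_id = events.id " ++ " JOIN sent on sent.id = directives.sent_id "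
  let r := q.foldl
    (fun (st : String × List String × Int) subquerytuple =>
      if st.2.2 > 0 then
        (st.1 ++ " AND " ++ subquerytuple.1, st.2.1 ++ [subquerytuple.2], st.2.2 + 1)
      else
        (st.1 ++ " WHERE " ++ subquerytuple.1, st.2.1 ++ [subquerytuple.2], st.2.2 + 1))
    (q_string, ([], (0 : Int)))
  (r.1, r.2.1)

-- ===== PORT B =====
def query_prepare_export_alt (q : List (String × String)) : String × List String :=
  let q_string := "SELECT * FROM events JOIN directives on directives.events_id = events.id  JOIN sent on sent.id = directives.sent_id "
  let clauses := q.map (·.1)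
  let params := q.map (·.2)
  let q_string := if clauses.isEmpty then q_string
                  else q_string ++ (" WHERE " ++ PySem.Str.join " AND " clauses)
  (q_string, params)

-- ===== PRECONDITION & SPEC =====
def Spec_query_prepare_export (q : List (String × String)) (out : String × List String) : Prop := out = query_prepare_export_alt q
instance (q : List (String × String)) (out : String × List String) : Decidable (Spec_query_prepare_export q out) := by unfold Spec_query_prepare_export; infer_instance

-- ===== CLAIM (what is proved, stated in full; the proofs are below) =====
def Claim_equal_query_prepare_export : Prop := ∀ (q : List (String × String)), Dom_query_prepare_export q → Spec_query_prepare_export q (query_prepare_export q)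

-- ===== LEMMAS AND PROOFS =====

-- pulling a common prefix through the ' AND '-accumulating foldl (over strings)
theorem pv_foldl_and_prefix (xs : List String) (p s : String) :
    p ++ xs.foldl (fun a c => a ++ " AND " ++ c) s
      = xs.foldl (fun a c => a ++ " AND " ++ c) (p ++ s) := by
  induction xs generalizing s with
  | nil => rfl
  | cons x xs ih =>
    simp only [List.foldl_cons]
    rw [ih]
    congr 1
    simp [String.append_assoc]

-- same, for the fold over tuples that A's loop performs
theorem pv_foldl_and_prefix_fst (xs : List (String × String)) (p s : String) :
    p ++ xs.foldl (fun a t => a ++ " AND " ++ t.1) s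
      = xs.foldl (fun a t => a ++ " AND " ++ t.1) (p ++ s) := by
  induction xs generalizing s with
  | nil => rfl
  | cons x xs ih =>
    simp only [List.foldl_cons]
    rw [ih]
    congr 1
    simp [String.append_assoc]

-- ' AND '.join of a nonempty list as a left fold
theorem pv_join_and_cons (x : String) (xs : List String) :
    PySem.Str.join " AND " (x :: xs) = xs.foldl (fun a c => a ++ " AND " ++ c) x := by
  induction xs generalizing x with
  | nil =>
    apply String.toList_inj.mp
    simp [PySem.Str.toList_join, PySem.Chars.join, List.intercalate]
  | cons y ys ih =>
    have h : PySem.Str.join " AND " (x :: y :: ys) = x ++ " AND " ++ PySem.Str.join " AND " (y :: ys) := by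
      apply String.toList_inj.mp
      simp [PySem.Str.toList_join, PySem.Chars.join_cons_cons, String.toList_append]
    rw [h, ih y]
    simp only [List.foldl_cons]
    rw [String.append_assoc, pv_foldl_and_prefix, pv_foldl_and_prefix]
    congr 1
    rw [String.append_assoc]

-- A's loop after the first tuple: counter stays positive, so it is the ' AND ' fold
theorem pv_foldA_pos (ts : List (String × String)) (s : String) (ps : List String) (c : Int) (hc : 0 < c) :
    ts.foldl
      (fun (st : String × List String × Int) t =>
        if st.2.2 > 0 then
          (st.1 ++ " AND " ++ t.1, st.2.1 ++ [t.2], st.2.2 + 1)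
        else
          (st.1 ++ " WHERE " ++ t.1, st.2.1 ++ [t.2], st.2.2 + 1))
      (s, ps, c)
      = (ts.foldl (fun a t => a ++ " AND " ++ t.1) s, ps ++ ts.map (·.2), c + ts.length) := by
  induction ts generalizing s ps c with
  | nil => simp
  | cons t ts ih =>
    simp only [List.foldl_cons, if_pos hc]
    rw [ih _ _ _ (by omega)]
    exact Prod.ext rfl (Prod.ext (by simp) (by simp; omega))

-- ===== VERDICT (by name: the statement is the Claim_ definition above) =====
theorem query_prepare_export_spec : Claim_equal_query_prepare_export := by
  intro q _
  unfold Spec_query_prepare_export query_prepare_export query_prepare_export_alt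
  cases q with
  | nil => rfl
  | cons t ts =>
    simp only [List.foldl_cons, List.map_cons, List.isEmpty_cons, Bool.false_eq_true, if_false]
    rw [if_neg (by norm_num), pv_foldA_pos _ _ _ _ (by norm_num)]
    rw [pv_join_and_cons, List.foldl_map]
    rw [pv_foldl_and_prefix_fst, pv_foldl_and_prefix_fst]
    have hbase : ("SELECT * FROM events" ++ " JOIN directives on directives.events_id = events.id " ++ " JOIN sent on sent.id = directives.sent_id " ++ " WHERE " ++ t.1 : String)
        = "SELECT * FROM events JOIN directives on directives.events_id = events.id  JOIN sent on sent.id = directives.sent_id " ++ (" WHERE " ++ t.1) := by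
      rw [show ("SELECT * FROM events" ++ " JOIN directives on directives.events_id = events.id " ++ " JOIN sent on sent.id = directives.sent_id " : String)
            = "SELECT * FROM events JOIN directives on directives.events_id = events.id  JOIN sent on sent.id = directives.sent_id " from by decide,
          String.append_assoc]
    rw [hbase]
    simp
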